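-- pv_equiv track=rewrite | github.com/catSirup/coding_test | Ace_Project_CodingTest/test.py | solution
-- ===== SOURCE A (Python) =====
-- def solution(n, v):
--     answer = 0
--     _min = 0
--
--     for i in range(0, n + 1):
--         sum_left = sum(v[:i])
--         sum_right = sum(v[i:])
--
--         if i == 0:
--             _min = abs(sum_left - sum_right)
--         else:
--             if _min > abs(sum_left - sum_right):
--                 _min = abs(sum_left - sum_right)
--                 answer = i
--     return answer
-- ===== SOURCE B (Python) =====
-- def solution(n, v):
--     total = sum(v)
--     answer = 0
--     best = abs(total)
--     left = 0
--     for i in range(1, n + 1):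
--         if i <= len(v):
--             left += v[i - 1]
--         d = abs(2 * left - total)
--         if d < best:
--             best = d
--             answer = i
--     return answer
-- ===== Notes on version B (the rewrite author's own statement) =====
-- stated objective: faster
-- what changed: Replaced the per-index slicing/summing (each iteration re-sums both halves) by one running prefix sum against a precomputed total, a single O(n) pass.
import Mathlib
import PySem

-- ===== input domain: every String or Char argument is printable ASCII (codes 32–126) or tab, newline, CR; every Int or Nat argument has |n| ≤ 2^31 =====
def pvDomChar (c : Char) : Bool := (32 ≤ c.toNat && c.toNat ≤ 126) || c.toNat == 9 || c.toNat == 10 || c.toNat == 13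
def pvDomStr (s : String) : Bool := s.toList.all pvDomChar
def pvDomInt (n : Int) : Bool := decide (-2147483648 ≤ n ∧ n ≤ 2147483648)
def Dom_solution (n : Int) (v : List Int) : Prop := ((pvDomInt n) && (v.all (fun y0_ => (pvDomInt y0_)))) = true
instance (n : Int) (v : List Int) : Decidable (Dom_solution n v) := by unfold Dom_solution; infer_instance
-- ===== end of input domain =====

-- B replaces A's per-index re-summing of both slices (O(n^2)) by a single pass with a running prefix sum; proven to return the same index.

-- ===== PORT A =====
-- one loop iteration of A: state (answer, _min), index i
def solStepA (v : List Int) (st : Int × Int) (i : Int) : Int × Int :=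
  let sumLeft := (PySem.List.slice v none (some i)).sum
  let sumRight := (PySem.List.slice v (some i) none).sum
  if i = 0 then (st.1, |sumLeft - sumRight|)
  else if st.2 > |sumLeft - sumRight| then (i, |sumLeft - sumRight|)
  else st

def solution (n : Int) (v : List Int) : Int :=
  ((PySem.List.pyRange 0 (n + 1) 1).foldl (solStepA v) (0, 0)).1

-- ===== PORT B =====
-- one loop iteration of B: state (answer, best, left), index i
def solStepB (v : List Int) (total : Int) (st : Int × Int × Int) (i : Int) : Int × Int × Int :=
  let left := if i ≤ (v.length : Int) then st.2.2 + PySem.List.pyGetD v (i - 1) 0 else st.2.2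
  let d := |2 * left - total|
  if d < st.2.1 then (i, d, left) else (st.1, st.2.1, left)

def solution_alt (n : Int) (v : List Int) : Int :=
  let total := v.sum
  ((PySem.List.pyRange 1 (n + 1) 1).foldl (solStepB v total) (0, |total|, 0)).1

-- ===== PRECONDITION & SPEC =====
def Spec_solution (n : Int) (v : List Int) (out : Int) : Prop := out = solution_alt n v
instance (n : Int) (v : List Int) (out : Int) : Decidable (Spec_solution n v out) := by unfold Spec_solution; infer_instance

-- ===== CLAIM (what is proved, stated in full; the proofs are below) =====
def Claim_equal_solution : Prop := ∀ (n : Int) (v : List Int), Dom_solution n v → Spec_solution n v (solution n v)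

-- ===== LEMMAS AND PROOFS =====

-- the invariant: over indices 1..k, B's fold tracks A's fold plus the prefix sum
theorem sol_inv (v : List Int) (k : Nat) (a m : Int) :
    (PySem.List.pyRange 1 ((k : Int) + 1) 1).foldl (solStepB v v.sum) (a, m, 0) =
      (((PySem.List.pyRange 1 ((k : Int) + 1) 1).foldl (solStepA v) (a, m)).1,
       ((PySem.List.pyRange 1 ((k : Int) + 1) 1).foldl (solStepA v) (a, m)).2,
       (v.take k).sum) := by
  induction k generalizing a m with
  | zero => simp
  | succ k ih =>
    have h1 : ((k + 1 : Nat) : Int) + 1 = ((k : Int) + 1) + 1 := by push_cast; ring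
    rw [h1, PySem.List.pyRange_one_succ_right (by omega : (1:Int) ≤ (k:Int) + 1),
      List.foldl_append, List.foldl_append, ih]
    simp only [List.foldl_cons, List.foldl_nil]
    have hsl : PySem.List.slice v none (some ((k:Int)+1)) = v.take (k+1) := by
      have h := PySem.List.slice_to_natCast v (k+1)
      push_cast at h; exact h
    have hsr : PySem.List.slice v (some ((k:Int)+1)) none = v.drop (k+1) := by
      have h := PySem.List.slice_from_natCast v (k+1)
      push_cast at h; exact h
    have hsplit : (v.take (k+1)).sum + (v.drop (k+1)).sum = v.sum := by
      rw [← List.sum_append, List.take_append_drop]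
    have hleft : (if ((k:Int)+1) ≤ (v.length : Int)
        then (v.take k).sum + PySem.List.pyGetD v ((k:Int)+1-1) 0
        else (v.take k).sum) = (v.take (k+1)).sum := by
      by_cases hk : k < v.length
      · rw [if_pos (by exact_mod_cast hk)]
        have hg : PySem.List.pyGetD v ((k:Int)+1-1) 0 = v[k] := by
          have : ((k:Int)+1-1) = ((k:Nat):Int) := by ring
          rw [this, PySem.List.pyGetD_natCast]
          simp [List.getD, hk]
        rw [hg, List.sum_take_succ v k hk]
      · rw [if_neg (by simpa using hk), List.take_of_length_le (by omega),
          List.take_of_length_le (by omega)]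
    have habs : |(v.take (k+1)).sum - (v.drop (k+1)).sum| = |2 * (v.take (k+1)).sum - v.sum| := by
      have : (v.take (k+1)).sum - (v.drop (k+1)).sum = 2 * (v.take (k+1)).sum - v.sum := by omega
      rw [this]
    set r := (PySem.List.pyRange 1 ((k:Int)+1) 1).foldl (solStepA v) (a, m) with hr
    simp only [solStepA, solStepB, hsl, hsr, hleft, habs]
    rw [if_neg (by omega : ¬ ((k:Int)+1 = 0))]
    by_cases hc : |2 * (v.take (k+1)).sum - v.sum| < r.2
    · rw [if_pos hc, if_pos hc]
    · rw [if_neg hc, if_neg hc]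

theorem solution_eq (n : Int) (v : List Int) : solution n v = solution_alt n v := by
  by_cases hn : 0 ≤ n
  · obtain ⟨k, hk⟩ := Int.eq_ofNat_of_zero_le hn
    subst hk
    unfold solution solution_alt
    rw [PySem.List.pyRange_one_cons (by omega : (0:Int) < (k:Int) + 1)]
    simp only [List.foldl_cons]
    have hstep0 : solStepA v (0, 0) 0 = (0, |v.sum|) := by
      simp [solStepA, PySem.List.slice_zero_start, PySem.List.slice_none_none]
      have h := PySem.List.slice_to_natCast v 0
      push_cast at h
      simp [h]
    rw [hstep0]
    have h := sol_inv v k 0 (|v.sum|)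
    simp only [zero_add, h]
  · unfold solution solution_alt
    have h1 : ((n + 1) - 0).toNat = 0 := by omega
    have h2 : ((n + 1) - 1).toNat = 0 := by omega
    rw [PySem.List.pyRange_one, PySem.List.pyRange_one, h1, h2]
    simp

-- ===== VERDICT (by name: the statement is the Claim_ definition above) =====
theorem solution_spec : Claim_equal_solution := by
  intro n v _
  unfold Spec_solution
  exact solution_eq n v
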